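-- pv_equiv track=rewrite | github.com/archishmanghos/DSA-Contests | Interviews/GFG/Daily-Problems/2022/October/Day-31/Satisfy-the-equation.py | satisfyEqn
-- ===== SOURCE A (Python) =====
-- def satisfyEqn (A, N):
--     ump, ans = {}, [-1, -1, -1, -1]
--     for i in range(N - 1):
--         for j in range(i + 1, N):
--             x = A[i] + A[j]
--             if x in ump:
--                 if ump[x][0] == i or ump[x][1] == i or ump[x][0] == j or ump[x][1] == j: continue
--                 v = [ump[x][0], ump[x][1], i, j]
--                 if ans[0] == -1 or v < ans:
--                     ans = v
--             else:
--                 ump[x] = [i, j]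
--
--     return ans
-- ===== SOURCE B (Python) =====
-- def satisfyEqn(A, N):
--     # Phase 1: group every pair (i, j), i < j, by its sum, in lexicographic pair order.
--     groups = {}
--     for i in range(N - 1):
--         for j in range(i + 1, N):
--             groups.setdefault(A[i] + A[j], []).append((i, j))
--     # Phase 2: within each sum group only its first (lexicographically smallest)
--     # pair can be the left half; scan the later pairs for a disjoint partner.
--     ans = [-1, -1, -1, -1]
--     for ps in groups.values():
--         p0, p1 = ps[0]
--         for q0, q1 in ps[1:]:
--             if q0 != p0 and q0 != p1 and q1 != p0 and q1 != p1:
--                 v = [p0, p1, q0, q1]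
--                 if ans[0] == -1 or v < ans:
--                     ans = v
--     return ans
-- ===== Notes on version B (the rewrite author's own statement) =====
-- stated objective: alternative
-- what changed: Replaces A's interleaved single pass (dict of first pair per sum plus a running minimum updated while enumerating pairs) with a two-phase group-by: phase 1 builds a dict mapping each sum to the list of ALL its pairs in lexicographic order, phase 2 iterates the dict's groups, pairing each group's first pair with its later disjoint pairs and taking the minimum candidate.
import Mathlib
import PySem

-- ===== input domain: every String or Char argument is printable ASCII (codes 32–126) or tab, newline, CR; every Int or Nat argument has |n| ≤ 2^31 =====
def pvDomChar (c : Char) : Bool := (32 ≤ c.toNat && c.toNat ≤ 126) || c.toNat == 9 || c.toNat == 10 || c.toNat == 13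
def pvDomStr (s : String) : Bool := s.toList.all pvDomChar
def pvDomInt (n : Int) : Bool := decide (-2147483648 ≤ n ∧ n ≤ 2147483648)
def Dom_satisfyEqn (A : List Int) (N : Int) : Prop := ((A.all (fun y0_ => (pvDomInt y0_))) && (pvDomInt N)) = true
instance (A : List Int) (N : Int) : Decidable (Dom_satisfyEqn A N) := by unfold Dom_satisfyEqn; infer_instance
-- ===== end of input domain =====

-- B replaces A's interleaved single pass (first-pair dict + running minimum) by a two-phase
-- group-by: build the dict of ALL pairs per sum first, then scan each group's first pair
-- against its later disjoint pairs (objective: alternative decomposition, same O(N^2) cost).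

-- ===== PORT A =====
def satisfyEqn (A : List Int) (N : Int) : List Int :=
  ((PySem.List.pyRange 0 (N - 1) 1).foldl (fun st i =>
    (PySem.List.pyRange (i + 1) N 1).foldl
      (fun (st : PySem.Dict Int (Int × Int) × List Int) j =>
        let x := PySem.List.pyGetD A i 0 + PySem.List.pyGetD A j 0
        match st.1.get? x with
        | some p =>
            if p.1 = i ∨ p.2 = i ∨ p.1 = j ∨ p.2 = j then st
            else
              let v := [p.1, p.2, i, j]
              if PySem.List.pyGetD st.2 0 0 = -1 ∨ v < st.2 then (st.1, v) else st
        | none => (st.1.insert x (i, j), st.2)) st)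
    ((PySem.Dict.empty : PySem.Dict Int (Int × Int)), [-1, -1, -1, -1])).2

-- ===== PORT B =====
def satisfyEqn_alt (A : List Int) (N : Int) : List Int :=
  let groups : PySem.Dict Int (List (Int × Int)) :=
    (PySem.List.pyRange 0 (N - 1) 1).foldl (fun g i =>
      (PySem.List.pyRange (i + 1) N 1).foldl (fun g j =>
        g.modify (PySem.List.pyGetD A i 0 + PySem.List.pyGetD A j 0) [] (fun l => l ++ [(i, j)])) g)
      PySem.Dict.empty
  groups.values.foldl (fun ans ps =>
    match ps with
    | [] => ans
    | p :: qs =>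
        qs.foldl (fun ans q =>
          if q.1 ≠ p.1 ∧ q.1 ≠ p.2 ∧ q.2 ≠ p.1 ∧ q.2 ≠ p.2 then
            if PySem.List.pyGetD ans 0 0 = -1 ∨ [p.1, p.2, q.1, q.2] < ans then
              [p.1, p.2, q.1, q.2]
            else ans
          else ans) ans) [-1, -1, -1, -1]

-- ===== PRECONDITION & SPEC =====
-- Pre_ excludes exactly the inputs on which the Python A raises IndexError (2 ≤ N but
-- fewer than N elements in A); on every other input A returns normally.
def Pre_satisfyEqn (A : List Int) (N : Int) : Prop := N ≤ (A.length : Int) ∨ N ≤ 1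
instance (A : List Int) (N : Int) : Decidable (Pre_satisfyEqn A N) := by
  unfold Pre_satisfyEqn; infer_instance
def pvWitness_satisfyEqn : List Int × Int := ([1, 2, 3, 3], 4)

def Spec_satisfyEqn (A : List Int) (N : Int) (out : List Int) : Prop := out = satisfyEqn_alt A N
instance (A : List Int) (N : Int) (out : List Int) : Decidable (Spec_satisfyEqn A N out) := by
  unfold Spec_satisfyEqn; infer_instance

-- ===== CLAIM (what is proved, stated in full; the proofs are below) =====
def Claim_equal_satisfyEqn : Prop := ∀ (A : List Int) (N : Int), Dom_satisfyEqn A N → Pre_satisfyEqn A N → Spec_satisfyEqn A N (satisfyEqn A N)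

-- ===== LEMMAS AND PROOFS =====

-- the sum of a pair's two elements, as both programs compute it
def keyF (A : List Int) (p : Int × Int) : Int :=
  PySem.List.pyGetD A p.1 0 + PySem.List.pyGetD A p.2 0

-- all index pairs (i, j), i < j, in the order both loop nests enumerate them
def pairsL (N : Int) : List (Int × Int) :=
  (PySem.List.pyRange 0 (N - 1) 1).flatMap
    (fun i => (PySem.List.pyRange (i + 1) N 1).map (fun j => (i, j)))

-- the running-minimum update both programs perform on a candidate v
def stepm (ans v : List Int) : List Int :=
  if PySem.List.pyGetD ans 0 0 = -1 ∨ v < ans then v else ans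

def mkv (f q : Int × Int) : List Int := [f.1, f.2, q.1, q.2]

-- A's per-pair state transformer
def stA (A : List Int) (st : PySem.Dict Int (Int × Int) × List Int) (p : Int × Int) :
    PySem.Dict Int (Int × Int) × List Int :=
  match st.1.get? (keyF A p) with
  | some f =>
      if f.1 = p.1 ∨ f.2 = p.1 ∨ f.1 = p.2 ∨ f.2 = p.2 then st
      else if PySem.List.pyGetD st.2 0 0 = -1 ∨ mkv f p < st.2 then (st.1, mkv f p) else st
  | none => (st.1.insert (keyF A p) p, st.2)

-- candidates A emits while scanning ps with first-pair dict d
def candA (A : List Int) : List (Int × Int) → PySem.Dict Int (Int × Int) → List (List Int)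
  | [], _ => []
  | p :: ps, d =>
    match d.get? (keyF A p) with
    | some f =>
        (if f.1 = p.1 ∨ f.2 = p.1 ∨ f.1 = p.2 ∨ f.2 = p.2 then [] else [mkv f p])
          ++ candA A ps d
    | none => candA A ps (d.insert (keyF A p) p)

-- the candidate a pair q contributes, described globally: compare q with the first
-- pair of q's sum in the full list `all`
def gfun (A : List Int) (all : List (Int × Int)) (q : Int × Int) : Option (List Int) :=
  match (all.filter (fun p => keyF A p == keyF A q)).head? with
  | none => none
  | some f =>
      if f = q then none
      else if f.1 = q.1 ∨ f.2 = q.1 ∨ f.1 = q.2 ∨ f.2 = q.2 then none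
      else some (mkv f q)

-- candidates B extracts from one group
def candG (ps : List (Int × Int)) : List (List Int) :=
  match ps with
  | [] => []
  | p :: qs =>
      (qs.filter (fun q => decide (q.1 ≠ p.1 ∧ q.1 ≠ p.2 ∧ q.2 ≠ p.1 ∧ q.2 ≠ p.2))).map (mkv p)

-- B's group dict, flattened over the pair list
def groupsD (A : List Int) (l : List (Int × Int)) : PySem.Dict Int (List (Int × Int)) :=
  l.foldl (fun g p => g.modify (keyF A p) [] (fun l => l ++ [p])) PySem.Dict.empty

theorem satisfyEqn_eq_foldl (A : List Int) (N : Int) :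
    satisfyEqn A N = ((pairsL N).foldl (stA A) (PySem.Dict.empty, [-1, -1, -1, -1])).2 := by
  simp only [satisfyEqn, pairsL, List.foldl_flatMap, List.foldl_map, stA, keyF, mkv]

theorem foldl_stA_eq_candA (A : List Int) :
    ∀ (ps : List (Int × Int)) (d : PySem.Dict Int (Int × Int)) (ans : List Int),
      (ps.foldl (stA A) (d, ans)).2 = (candA A ps d).foldl stepm ans := by
  intro ps
  induction ps with
  | nil => intro d ans; simp [candA]
  | cons p ps ih =>
    intro d ans
    rw [List.foldl_cons]
    cases h : d.get? (keyF A p) with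
    | none =>
      rw [show candA A (p :: ps) d = candA A ps (d.insert (keyF A p) p) from by
            simp [candA, h],
          show stA A (d, ans) p = (d.insert (keyF A p) p, ans) from by simp [stA, h]]
      exact ih _ _
    | some f =>
      by_cases hs : f.1 = p.1 ∨ f.2 = p.1 ∨ f.1 = p.2 ∨ f.2 = p.2
      · rw [show candA A (p :: ps) d = candA A ps d from by simp [candA, h, hs],
          show stA A (d, ans) p = (d, ans) from by simp [stA, h, hs]]
        exact ih _ _
      · rw [show candA A (p :: ps) d = mkv f p :: candA A ps d from by simp [candA, h, hs],
          show stA A (d, ans) p =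
            if PySem.List.pyGetD ans 0 0 = -1 ∨ mkv f p < ans then (d, mkv f p)
            else (d, ans) from by simp [stA, h, hs],
          List.foldl_cons]
        by_cases hc : PySem.List.pyGetD ans 0 0 = -1 ∨ mkv f p < ans
        · rw [if_pos hc, show stepm ans (mkv f p) = mkv f p from by simp [stepm, hc]]
          exact ih _ _
        · rw [if_neg hc, show stepm ans (mkv f p) = ans from by simp [stepm, hc]]
          exact ih _ _

theorem satisfyEqn_alt_eq_foldl (A : List Int) (N : Int) :
    satisfyEqn_alt A N =
      (((groupsD A (pairsL N)).values.flatMap candG).foldl stepm [-1, -1, -1, -1]) := by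
  rw [List.foldl_flatMap]
  have hg : (PySem.List.pyRange 0 (N - 1) 1).foldl (fun g i =>
      (PySem.List.pyRange (i + 1) N 1).foldl (fun g j =>
        g.modify (PySem.List.pyGetD A i 0 + PySem.List.pyGetD A j 0) [] (fun l => l ++ [(i, j)])) g)
      PySem.Dict.empty = groupsD A (pairsL N) := by
    simp only [groupsD, pairsL, List.foldl_flatMap, List.foldl_map, keyF]
  simp only [satisfyEqn_alt, hg]
  apply PySem.List.foldl_congr_mem
  intro ans ps _
  cases ps with
  | nil => simp [candG]
  | cons p qs =>
    simp only [candG]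
    rw [PySem.List.foldl_ite_eq_foldl_filter
      (p := fun q : Int × Int => q.1 ≠ p.1 ∧ q.1 ≠ p.2 ∧ q.2 ≠ p.1 ∧ q.2 ≠ p.2), List.foldl_map]
    simp only [stepm, mkv]

theorem filterMap_ite_none {α β : Type} (C : α → Prop) [DecidablePred C] (m : α → β) :
    ∀ l : List α, l.filterMap (fun q => if C q then none else some (m q)) =
      (l.filter (fun q => !decide (C q))).map m := by
  intro l
  induction l with
  | nil => simp
  | cons a l ih => by_cases h : C a <;> simp [h, ih]

theorem groupsD_values (A : List Int) (l : List (Int × Int)) :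
    (groupsD A l).values =
      (PySem.Set.ofList (l.map (keyF A))).map
        (fun s => l.filter (fun p => keyF A p == s)) := by
  have hfold : groupsD A l = (l.map (fun p => (keyF A p, p))).foldl
      (fun d pr => d.modify pr.1 [] (fun v => v ++ [pr.2])) PySem.Dict.empty := by
    rw [groupsD, List.foldl_map]
  have hkeys : (groupsD A l).keys = PySem.Set.ofList (l.map (keyF A)) := by
    rw [hfold, PySem.Dict.keys_foldl_modify_key (l.map (fun p => (keyF A p, p)))
      (fun pr => pr.1) [] (fun _ pr v => v ++ [pr.2]) PySem.Dict.empty]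
    rw [PySem.Dict.keys_empty, PySem.Set.update_nil_left, List.map_map]
    simp [Function.comp_def]
  have hndk : (groupsD A l).keys.Nodup := by
    rw [hfold]
    exact PySem.Dict.nodup_keys_foldl_modify_key _ _ _ _ _
      (by rw [PySem.Dict.keys_empty]; exact List.nodup_nil)
  have hget : ∀ s, (groupsD A l).getD s [] = l.filter (fun p => keyF A p == s) := by
    intro s
    rw [hfold, PySem.Dict.getD_foldl_modify_append]
    rw [List.filter_map, List.map_map]
    simp [Function.comp_def]
  rw [PySem.Dict.values_eq_map_keys _ hndk [], hkeys]
  exact List.map_congr_left (fun s _ => hget s)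

theorem candA_eq_filterMap (A : List Int) (all : List (Int × Int)) (hnd : all.Nodup) :
    ∀ (ps pre : List (Int × Int)) (d : PySem.Dict Int (Int × Int)),
      pre ++ ps = all →
      (∀ s : Int, d.get? s = ((pre.filter (fun p => keyF A p == s)).head?)) →
      candA A ps d = ps.filterMap (gfun A all) := by
  intro ps
  induction ps with
  | nil => intro pre d _ _; simp [candA]
  | cons q ps ih =>
    intro pre d hpre hd
    have hkey := hd (keyF A q)
    cases hh : d.get? (keyF A q) with
    | none =>
      rw [hh] at hkey
      have hpref : pre.filter (fun p => keyF A p == keyF A q) = [] := by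
        rwa [eq_comm, List.head?_eq_none_iff] at hkey
      have hg : gfun A all q = none := by
        have hall : all.filter (fun p => keyF A p == keyF A q) =
            q :: ps.filter (fun p => keyF A p == keyF A q) := by
          rw [← hpre, List.filter_append, hpref, List.nil_append, List.filter_cons]
          simp
        simp [gfun, hall]
      rw [show candA A (q :: ps) d = candA A ps (d.insert (keyF A q) q) from by
        simp [candA, hh]]
      rw [List.filterMap_cons, hg]
      refine ih (pre ++ [q]) _ (by simpa using hpre) ?_
      intro s
      by_cases hs : keyF A q = s
      · subst hs
        rw [PySem.Dict.get?_insert_self, List.filter_append, hpref, List.nil_append]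
        simp
      · rw [PySem.Dict.get?_insert_of_ne _ _ (fun h => hs h.symm), hd s, List.filter_append]
        have : List.filter (fun p => keyF A p == s) [q] = [] := by simp [hs]
        rw [this, List.append_nil]
    | some f =>
      rw [hh] at hkey
      have hf : (pre.filter (fun p => keyF A p == keyF A q)).head? = some f := hkey.symm
      obtain ⟨t, ht⟩ : ∃ t, pre.filter (fun p => keyF A p == keyF A q) = f :: t := by
        cases hl : pre.filter (fun p => keyF A p == keyF A q) with
        | nil => rw [hl] at hf; simp at hf
        | cons a t =>
          rw [hl, List.head?_cons, Option.some_inj] at hf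
          exact ⟨t, by rw [hf]⟩
      have hall : all.filter (fun p => keyF A p == keyF A q) =
          f :: (t ++ (q :: ps).filter (fun p => keyF A p == keyF A q)) := by
        rw [← hpre, List.filter_append, ht, List.cons_append]
      have hfq : f ≠ q := by
        have hfmem : f ∈ pre :=
          List.mem_of_mem_filter (ht ▸ List.mem_cons_self)
        have hdisj := (List.nodup_append.mp (hpre ▸ hnd)).2.2
        intro e
        exact hdisj f hfmem q List.mem_cons_self e
      have hinv : ∀ s : Int, d.get? s = (((pre ++ [q]).filter (fun p => keyF A p == s)).head?) := by
        intro s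
        rw [List.filter_append]
        by_cases hs : keyF A q = s
        · subst hs
          rw [ht, hh, List.cons_append, List.head?_cons]
        · have : List.filter (fun p => keyF A p == s) [q] = [] := by simp [hs]
          rw [this, List.append_nil, hd s]
      have hgq : gfun A all q =
          if f.1 = q.1 ∨ f.2 = q.1 ∨ f.1 = q.2 ∨ f.2 = q.2 then none else some (mkv f q) := by
        simp [gfun, hall, hfq]
      rw [show candA A (q :: ps) d =
          (if f.1 = q.1 ∨ f.2 = q.1 ∨ f.1 = q.2 ∨ f.2 = q.2 then [] else [mkv f q])
            ++ candA A ps d from by simp [candA, hh]]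
      by_cases hs : f.1 = q.1 ∨ f.2 = q.1 ∨ f.1 = q.2 ∨ f.2 = q.2
      · rw [if_pos hs, List.nil_append, List.filterMap_cons, hgq, if_pos hs]
        exact ih (pre ++ [q]) d (by simpa using hpre) hinv
      · rw [if_neg hs, List.singleton_append, List.filterMap_cons, hgq, if_neg hs]
        exact congrArg (fun l => mkv f q :: l) (ih (pre ++ [q]) d (by simpa using hpre) hinv)

theorem nodup_pairsL (N : Int) : (pairsL N).Nodup := by
  rw [pairsL, List.nodup_flatMap]
  constructor
  · intro i _
    exact (PySem.List.nodup_pyRange_one _ _).map (fun a b h => by injection h)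
  · refine (PySem.List.pairwise_lt_pyRange_one 0 (N - 1)).imp ?_
    intro a b hab x hx hy
    simp only [List.mem_map] at hx hy
    obtain ⟨j, _, rfl⟩ := hx
    obtain ⟨k, _, h2⟩ := hy
    have : b = a := by simpa using congrArg Prod.fst h2
    omega

theorem fst_nonneg_of_mem_pairsL {N : Int} {p : Int × Int} (h : p ∈ pairsL N) : 0 ≤ p.1 := by
  simp only [pairsL, List.mem_flatMap, List.mem_map, PySem.List.mem_pyRange_one] at h
  obtain ⟨i, ⟨hi0, _⟩, j, _, rfl⟩ := h
  exact hi0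

theorem perm_flatMap_filter (A : List Int) :
    ∀ (S : List Int) (l : List (Int × Int)), S.Nodup → (∀ p ∈ l, keyF A p ∈ S) →
      (S.flatMap (fun s => l.filter (fun p => keyF A p == s))).Perm l := by
  intro S
  induction S with
  | nil =>
    intro l _ h
    cases l with
    | nil => simp
    | cons p l => exact absurd (h p (by simp)) (by simp)
  | cons s S ih =>
    intro l hnd h
    simp only [List.flatMap_cons]
    have hsS : s ∉ S := (List.nodup_cons.mp hnd).1
    have hco : ∀ p ∈ l.filter (fun p => !(keyF A p == s)), keyF A p ∈ S := by
      intro p hp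
      have hm := List.mem_of_mem_filter hp
      have hne : ¬ keyF A p = s := by simpa using (List.mem_filter.mp hp).2
      rcases List.mem_cons.mp (h p hm) with h1 | h1
      · exact absurd h1 hne
      · exact h1
    have hrw : S.flatMap (fun s' => l.filter (fun p => keyF A p == s')) =
        S.flatMap (fun s' => (l.filter (fun p => !(keyF A p == s))).filter
          (fun p => keyF A p == s')) := by
      rw [List.flatMap_def, List.flatMap_def]
      congr 1
      apply List.map_congr_left
      intro s' hs'
      have hne : s' ≠ s := fun e => hsS (e ▸ hs')
      rw [List.filter_filter]
      apply List.filter_congr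
      intro p _
      by_cases hp : keyF A p = s'
      · simp [hp, hne]
      · simp [hp]
    rw [hrw]
    exact ((ih _ (List.nodup_cons.mp hnd).2 hco).append_left _).trans
      (List.filter_append_perm _ l)

theorem filterMap_gfun_group (A : List Int) (all : List (Int × Int)) (hnd : all.Nodup)
    (s : Int) :
    (all.filter (fun p => keyF A p == s)).filterMap (gfun A all) =
      candG (all.filter (fun p => keyF A p == s)) := by
  cases hg : all.filter (fun p => keyF A p == s) with
  | nil => simp [candG]
  | cons f qs =>
    have hfilter : ∀ q ∈ f :: qs, all.filter (fun p => keyF A p == keyF A q) = f :: qs := by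
      intro q hq
      have hq' : q ∈ all.filter (fun p => keyF A p == s) := by rw [hg]; exact hq
      have hqs : keyF A q = s := eq_of_beq (List.mem_filter.mp hq').2
      rw [hqs, hg]
    have hnod : (f :: qs).Nodup := hg ▸ hnd.filter _
    rw [List.filterMap_cons]
    have hgf : gfun A all f = none := by
      simp [gfun, hfilter f List.mem_cons_self]
    rw [hgf]
    have hrest : qs.filterMap (gfun A all) = qs.filterMap
        (fun q => if f.1 = q.1 ∨ f.2 = q.1 ∨ f.1 = q.2 ∨ f.2 = q.2 then none
          else some (mkv f q)) := by
      apply List.filterMap_congr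
      intro q hq
      have hfq : f ≠ q := fun e => (List.nodup_cons.mp hnod).1 (e ▸ hq)
      simp [gfun, hfilter q (List.mem_cons_of_mem _ hq), hfq]
    rw [hrest, filterMap_ite_none]
    simp only [candG]
    congr 1
    apply List.filter_congr
    intro q _
    rw [← decide_not, decide_eq_decide]
    omega

theorem head_ne_neg_one_of_mem_candA (A : List Int) (all : List (Int × Int))
    (hall : ∀ p ∈ all, 0 ≤ p.1) {v : List Int} (hv : v ∈ all.filterMap (gfun A all)) :
    PySem.List.pyGetD v 0 0 ≠ -1 := by
  rw [List.mem_filterMap] at hv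
  obtain ⟨q, _, hgq⟩ := hv
  simp only [gfun] at hgq
  cases hh : (all.filter (fun p => keyF A p == keyF A q)).head? with
  | none => rw [hh] at hgq; simp at hgq
  | some f =>
    rw [hh] at hgq
    simp only at hgq
    split_ifs at hgq with h1 h2
    have hfm0 : f ∈ all.filter (fun p => keyF A p == keyF A q) :=
      List.mem_of_mem_head? (Option.mem_def.mpr hh)
    have h0 := hall f (List.mem_of_mem_filter hfm0)
    have hveq : mkv f q = v := Option.some.inj hgq
    have hv0 : PySem.List.pyGetD v 0 0 = f.1 := by
      rw [← hveq]
      simp [mkv, PySem.List.pyGetD_zero_cons]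
    omega

theorem stepm_comm {x y : List Int} (hx : PySem.List.pyGetD x 0 0 ≠ -1)
    (hy : PySem.List.pyGetD y 0 0 ≠ -1) (z : List Int) :
    stepm (stepm z x) y = stepm (stepm z y) x := by
  have e : ∀ a b : List Int, PySem.List.pyGetD a 0 0 ≠ -1 →
      stepm a b = if b < a then b else a := by
    intro a b ha; simp only [stepm, ha, false_or]
  have m : ∀ a b : List Int, (if b < a then b else a) = if a < b then a else b := by
    intro a b
    rcases lt_trichotomy a b with h | h | h
    · rw [if_neg (asymm h), if_pos h]
    · rw [h]
    · rw [if_pos h, if_neg (asymm h)]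
  by_cases hz : PySem.List.pyGetD z 0 0 = -1
  · have z1 : stepm z x = x := by simp [stepm, hz]
    have z2 : stepm z y = y := by simp [stepm, hz]
    rw [z1, z2, e x y hx, e y x hy, m x y]
  · have hz' : ∀ w : List Int, stepm z w = if w < z then w else z := fun w => by
      simp only [stepm, hz, false_or]
    by_cases hxz : x < z <;> by_cases hyz : y < z
    · rw [hz' x, hz' y, if_pos hxz, if_pos hyz, e x y hx, e y x hy, m x y]
    · have hnyx : ¬ y < x := fun hyx => hyz (lt_trans hyx hxz)
      rw [hz' x, hz' y, if_pos hxz, if_neg hyz, e x y hx, if_neg hnyx, hz' x, if_pos hxz]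
    · have hnxy : ¬ x < y := fun hxy => hxz (lt_trans hxy hyz)
      rw [hz' x, hz' y, if_neg hxz, if_pos hyz, hz' y, e y x hy, if_pos hyz, if_neg hnxy]
    · rw [hz' x, hz' y, if_neg hxz, if_neg hyz, hz' y, hz' x, if_neg hxz, if_neg hyz]

theorem foldl_stepm_perm : ∀ {l l' : List (List Int)}, l.Perm l' →
    (∀ v ∈ l, PySem.List.pyGetD v 0 0 ≠ -1) →
    ∀ z, l.foldl stepm z = l'.foldl stepm z := by
  intro l l' h
  induction h with
  | nil => intro _ z; rfl
  | cons x h ih =>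
    intro hm z
    simp only [List.foldl_cons]
    exact ih (fun v hv => hm v (List.mem_cons_of_mem _ hv)) (stepm z x)
  | swap x y l =>
    intro hm z
    simp only [List.foldl_cons]
    rw [stepm_comm (hm x (by simp)) (hm y (by simp))]
  | trans h1 h2 ih1 ih2 =>
    intro hm z
    rw [ih1 hm z, ih2 (fun v hv => hm v (h1.mem_iff.mpr hv)) z]

-- ===== VERDICT (by name: the statement is the Claim_ definition above) =====
theorem satisfyEqn_spec : Claim_equal_satisfyEqn := by
  intro A N _ _
  show satisfyEqn A N = satisfyEqn_alt A N
  rw [satisfyEqn_eq_foldl, foldl_stA_eq_candA, satisfyEqn_alt_eq_foldl]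
  have hnd := nodup_pairsL N
  have hca : candA A (pairsL N) PySem.Dict.empty = (pairsL N).filterMap (gfun A (pairsL N)) :=
    candA_eq_filterMap A (pairsL N) hnd (pairsL N) [] PySem.Dict.empty rfl
      (fun s => by simp [PySem.Dict.get?_empty])
  rw [hca, groupsD_values, List.flatMap_map]
  have hfe : (fun s => candG ((pairsL N).filter (fun p => keyF A p == s))) =
      (fun s => ((pairsL N).filter (fun p => keyF A p == s)).filterMap (gfun A (pairsL N))) :=
    funext (fun s => (filterMap_gfun_group A (pairsL N) hnd s).symm)
  rw [hfe, ← List.filterMap_flatMap]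
  have hperm : ((PySem.Set.ofList ((pairsL N).map (keyF A))).flatMap
      (fun s => (pairsL N).filter (fun p => keyF A p == s))).Perm (pairsL N) :=
    perm_flatMap_filter A _ (pairsL N) (PySem.Set.nodup_ofList _)
      (fun p hp => (PySem.Set.mem_ofList _ _).mpr (List.mem_map_of_mem hp))
  exact foldl_stepm_perm ((List.Perm.filterMap (gfun A (pairsL N)) hperm).symm)
    (fun v hv => head_ne_neg_one_of_mem_candA A (pairsL N)
      (fun p hp => fst_nonneg_of_mem_pairsL hp) hv) _
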